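-- pv_equiv track=rewrite | github.com/wtrekell/deep-thought | src/deep_thought/audio/hallucination.py | _check_ngram_repetition_in_word_list
-- ===== SOURCE A (Python) =====
-- from collections import Counter
--
-- def _check_ngram_repetition_in_word_list(words: list[str], threshold: int) -> bool:
--     """Return True if any bigram or trigram appears >= threshold times in words.
--
--     Used both for within-segment checks and cross-segment window checks.
--
--     Args:
--         words: Pre-normalised, whitespace-split word list to scan.
--         threshold: Minimum occurrence count to consider repetitive.
--
--     Returns:
--         True if any bigram or trigram meets or exceeds the threshold, False otherwise.
--     """
--     if len(words) >= 2:
--         bigrams = [f"{words[i]} {words[i + 1]}" for i in range(len(words) - 1)]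
--         bigram_counts = Counter(bigrams)
--         if any(count >= threshold for count in bigram_counts.values()):
--             return True
--
--     if len(words) >= 3:
--         trigrams = [f"{words[i]} {words[i + 1]} {words[i + 2]}" for i in range(len(words) - 2)]
--         trigram_counts = Counter(trigrams)
--         if any(count >= threshold for count in trigram_counts.values()):
--             return True
--
--     return False
-- ===== SOURCE B (Python) =====
-- def _check_ngram_repetition_in_word_list(words: list[str], threshold: int) -> bool:
--     """Return True if any bigram or trigram appears >= threshold times in words.
--
--     Sort the n-gram list and scan it once, tracking the length of the current
--     run of equal adjacent elements, instead of hashing counts into a Counter.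
--     """
--     def has_repeated_run(grams: list[str]) -> bool:
--         grams = sorted(grams)
--         prev = None
--         run = 0
--         for g in grams:
--             run = run + 1 if g == prev else 1
--             prev = g
--             if run >= threshold:
--                 return True
--         return False
--
--     if len(words) >= 2:
--         if has_repeated_run([f"{words[i]} {words[i + 1]}" for i in range(len(words) - 1)]):
--             return True
--     if len(words) >= 3:
--         if has_repeated_run([f"{words[i]} {words[i + 1]} {words[i + 2]}" for i in range(len(words) - 2)]):
--             return True
--     return False
-- ===== Notes on version B (the rewrite author's own statement) =====
-- stated objective: alternative
-- what changed: Replaces Counter hashing per n-gram list by sorting the n-gram list and scanning it once for a run of equal adjacent elements of length >= threshold, with early exit inside the scan.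
import Mathlib
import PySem

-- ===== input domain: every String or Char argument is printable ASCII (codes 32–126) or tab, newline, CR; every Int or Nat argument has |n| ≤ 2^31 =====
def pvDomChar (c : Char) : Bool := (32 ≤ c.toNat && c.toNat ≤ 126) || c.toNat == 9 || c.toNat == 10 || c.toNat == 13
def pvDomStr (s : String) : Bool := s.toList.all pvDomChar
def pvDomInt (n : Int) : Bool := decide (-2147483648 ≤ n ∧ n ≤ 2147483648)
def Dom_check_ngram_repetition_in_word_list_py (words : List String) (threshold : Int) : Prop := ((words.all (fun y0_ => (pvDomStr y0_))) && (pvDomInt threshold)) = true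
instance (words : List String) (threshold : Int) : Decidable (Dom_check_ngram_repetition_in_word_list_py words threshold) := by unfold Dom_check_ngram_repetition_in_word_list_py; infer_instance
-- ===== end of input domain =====

-- B replaces Counter hashing by sort-then-scan of adjacent runs (objective: alternative, same task, different traversal).

-- ===== PORT A =====
-- f"{words[i]} {words[i+1]}": indices produced by range are always in range, so pyGetD's default is never used
def check_ngram_repetition_in_word_list_py (words : List String) (threshold : Int) : Bool :=
  let hit2 : Bool :=
    if 2 ≤ words.length then
      let bigrams := (PySem.List.pyRange 0 ((words.length : Int) - 1) 1).map
        (fun i => PySem.List.pyGetD words i "" ++ " " ++ PySem.List.pyGetD words (i + 1) "")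
      ((PySem.Dict.counter bigrams).values).any (fun c => decide (threshold ≤ c))
    else false
  if hit2 then true
  else if 3 ≤ words.length then
    let trigrams := (PySem.List.pyRange 0 ((words.length : Int) - 2) 1).map
      (fun i => PySem.List.pyGetD words i "" ++ " " ++ PySem.List.pyGetD words (i + 1) "" ++ " " ++ PySem.List.pyGetD words (i + 2) "")
    ((PySem.Dict.counter trigrams).values).any (fun c => decide (threshold ≤ c))
  else false

-- ===== PORT B =====
-- the for-loop of has_repeated_run: prev/run carried through the sorted list, early return on run >= threshold
def pvRunScan (t : Int) (prev : Option String) (run : Int) : List String → Bool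
  | [] => false
  | g :: rest =>
    let run' := if some g == prev then run + 1 else 1
    if t ≤ run' then true else pvRunScan t (some g) run' rest

def pvHasRepeatedRun (t : Int) (grams : List String) : Bool :=
  pvRunScan t none 0 (PySem.List.sorted grams (fun x => x) false)

def check_ngram_repetition_in_word_list_py_alt (words : List String) (threshold : Int) : Bool :=
  if decide (2 ≤ words.length) &&
      pvHasRepeatedRun threshold ((PySem.List.pyRange 0 ((words.length : Int) - 1) 1).map
        (fun i => PySem.List.pyGetD words i "" ++ " " ++ PySem.List.pyGetD words (i + 1) "")) then true
  else if decide (3 ≤ words.length) &&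
      pvHasRepeatedRun threshold ((PySem.List.pyRange 0 ((words.length : Int) - 2) 1).map
        (fun i => PySem.List.pyGetD words i "" ++ " " ++ PySem.List.pyGetD words (i + 1) "" ++ " " ++ PySem.List.pyGetD words (i + 2) "")) then true
  else false

-- ===== PRECONDITION & SPEC =====
def Spec_check_ngram_repetition_in_word_list_py (words : List String) (threshold : Int) (out : Bool) : Prop := out = check_ngram_repetition_in_word_list_py_alt words threshold
instance (words : List String) (threshold : Int) (out : Bool) : Decidable (Spec_check_ngram_repetition_in_word_list_py words threshold out) := by unfold Spec_check_ngram_repetition_in_word_list_py; infer_instance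

-- ===== CLAIM (what is proved, stated in full; the proofs are below) =====
def Claim_equal_check_ngram_repetition_in_word_list_py : Prop := ∀ (words : List String) (threshold : Int), Dom_check_ngram_repetition_in_word_list_py words threshold → Spec_check_ngram_repetition_in_word_list_py words threshold (check_ngram_repetition_in_word_list_py words threshold)

-- ===== LEMMAS AND PROOFS =====

-- run-scan over a sorted tail, carrying a run of k copies of p that has not yet reached t
lemma pvRunScan_aux (t : Int) (p : String) (k : Int) (l : List String)
    (hs : l.Pairwise (· ≤ ·)) (hge : ∀ g ∈ l, p ≤ g) (hkt : ¬ t ≤ k) :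
    pvRunScan t (some p) k l =
      decide (t ≤ k + (l.count p : Int) ∨ ∃ g ∈ l, g ≠ p ∧ t ≤ (l.count g : Int)) := by
  induction l generalizing p k with
  | nil => simp [pvRunScan]; omega
  | cons g rest ih =>
    have hsr : rest.Pairwise (· ≤ ·) := hs.tail
    have hgle : ∀ h ∈ rest, g ≤ h := fun h hh => (List.pairwise_cons.mp hs).1 h hh
    by_cases hgp : g = p
    · subst hgp
      by_cases ht : t ≤ k + 1
      · simp [pvRunScan, ht]
        have : (1 : Int) ≤ ((g :: rest).count g : Int) := by
          have := List.count_pos_iff.mpr (List.mem_cons_self (a := g) (l := rest))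
          omega
        left; omega
      · simp only [pvRunScan, beq_self_eq_true, if_true]
        rw [if_neg ht, ih g (k + 1) hsr hgle ht]
        simp only [decide_eq_decide]
        constructor
        · rintro (h1 | ⟨x, hx, hxg, hxc⟩)
          · left
            rw [List.count_cons_self]; push_cast; omega
          · right
            exact ⟨x, List.mem_cons_of_mem _ hx, hxg, by rwa [List.count_cons_of_ne (Ne.symm hxg)]⟩
        · rintro (h1 | ⟨x, hx, hxg, hxc⟩)
          · left
            rw [List.count_cons_self] at h1; push_cast at h1 ⊢; omega
          · rcases List.mem_cons.mp hx with rfl | hx'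
            · exact absurd rfl hxg
            · exact Or.inr ⟨x, hx', hxg, by rwa [List.count_cons_of_ne (Ne.symm hxg)] at hxc⟩
    · -- new run starts at g;  p < g ≤ every later element, so p never occurs in g :: rest
      have hpg : p < g := lt_of_le_of_ne (hge g (List.mem_cons_self)) (Ne.symm hgp)
      have hpnot : p ∉ g :: rest := by
        intro hmem
        rcases List.mem_cons.mp hmem with rfl | hm
        · exact hgp rfl
        · exact absurd (hgle p hm) (not_le.mpr hpg)
      have hcount0 : (g :: rest).count p = 0 := List.count_eq_zero.mpr hpnot
      by_cases ht1 : t ≤ 1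
      · have hne : (some g == some p) = false := by simp [hgp]
        simp only [pvRunScan, hne, Bool.false_eq_true, if_false]
        rw [if_pos ht1]
        have : (1 : Int) ≤ ((g :: rest).count g : Int) := by
          have := List.count_pos_iff.mpr (List.mem_cons_self (a := g) (l := rest))
          omega
        symm; simp only [decide_eq_true_eq]
        exact Or.inr ⟨g, List.mem_cons_self, hgp, by omega⟩
      · have hne : (some g == some p) = false := by simp [hgp]
        simp only [pvRunScan, hne, Bool.false_eq_true, if_false]
        rw [if_neg ht1, ih g 1 hsr hgle ht1]
        simp only [decide_eq_decide]
        constructor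
        · rintro (h1 | ⟨x, hx, hxg, hxc⟩)
          · refine Or.inr ⟨g, List.mem_cons_self, hgp, ?_⟩
            rw [List.count_cons_self]; push_cast at h1 ⊢; omega
          · have hxp : x ≠ p := by
              intro rfl'; subst rfl'
              exact absurd (hgle x hx) (not_le.mpr hpg)
            exact Or.inr ⟨x, List.mem_cons_of_mem _ hx, hxp,
              by rwa [List.count_cons_of_ne (Ne.symm hxg)]⟩
        · rintro (h1 | ⟨x, hx, _, hxc⟩)
          · rw [hcount0] at h1; push_cast at h1; omega
          · rcases List.mem_cons.mp hx with rfl | hx'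
            · left; rw [List.count_cons_self] at hxc; push_cast at hxc ⊢; omega
            · by_cases hxg : x = g
              · subst hxg
                left; rw [List.count_cons_self] at hxc; push_cast at hxc ⊢; omega
              · exact Or.inr ⟨x, hx', hxg, by rwa [List.count_cons_of_ne (Ne.symm hxg)] at hxc⟩

lemma pvRunScan_none (t : Int) (l : List String) (hs : l.Pairwise (· ≤ ·)) :
    pvRunScan t none 0 l = decide (∃ g ∈ l, t ≤ (l.count g : Int)) := by
  cases l with
  | nil => simp [pvRunScan]
  | cons g rest =>
    have hsr : rest.Pairwise (· ≤ ·) := hs.tail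
    have hgle : ∀ h ∈ rest, g ≤ h := fun h hh => (List.pairwise_cons.mp hs).1 h hh
    by_cases ht1 : t ≤ 1
    · simp only [pvRunScan]
      have : (1 : Int) ≤ ((g :: rest).count g : Int) := by
        have := List.count_pos_iff.mpr (List.mem_cons_self (a := g) (l := rest))
        omega
      simp only [show (some g == (none : Option String)) = false from rfl, Bool.false_eq_true,
        if_false]
      rw [if_pos ht1]
      symm; simp only [decide_eq_true_eq]
      exact ⟨g, List.mem_cons_self, by omega⟩
    · simp only [pvRunScan, show (some g == (none : Option String)) = false from rfl,
        Bool.false_eq_true, if_false]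
      rw [if_neg ht1, pvRunScan_aux t g 1 rest hsr hgle ht1]
      simp only [decide_eq_decide]
      constructor
      · rintro (h1 | ⟨x, hx, hxg, hxc⟩)
        · exact ⟨g, List.mem_cons_self, by rw [List.count_cons_self]; push_cast at h1 ⊢; omega⟩
        · exact ⟨x, List.mem_cons_of_mem _ hx, by rwa [List.count_cons_of_ne (Ne.symm hxg)]⟩
      · rintro ⟨x, hx, hxc⟩
        rcases List.mem_cons.mp hx with rfl | hx'
        · left; rw [List.count_cons_self] at hxc; push_cast at hxc ⊢; omega
        · by_cases hxg : x = g
          · subst hxg; left; rw [List.count_cons_self] at hxc; push_cast at hxc ⊢; omega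
          · exact Or.inr ⟨x, hx', hxg, by rwa [List.count_cons_of_ne (Ne.symm hxg)] at hxc⟩

-- A's "any count >= threshold over Counter(G).values()" equals B's sorted-run scan
lemma pvCounterHit_eq_scan (t : Int) (G : List String) :
    ((PySem.Dict.counter G).values).any (fun c => decide (t ≤ c)) = pvHasRepeatedRun t G := by
  have hvals : (PySem.Dict.counter G).values
      = ((PySem.Set.ofList G : List String).map (fun k => (k, (G.count k : Int)))).map (·.2) := by
    show ((PySem.Dict.counter G).items).map (·.2) = _
    rw [PySem.Dict.items_counter]
  have hA : ((PySem.Dict.counter G).values).any (fun c => decide (t ≤ c))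
      = decide (∃ g ∈ G, t ≤ (G.count g : Int)) := by
    rw [hvals, List.map_map, List.any_map]
    apply Bool.eq_iff_iff.mpr
    simp only [List.any_eq_true, Function.comp_apply, decide_eq_true_eq]
    constructor
    · rintro ⟨g, hg, hc⟩
      exact ⟨g, (PySem.Set.mem_ofList _ _).mp hg, hc⟩
    · rintro ⟨g, hg, hc⟩
      exact ⟨g, (PySem.Set.mem_ofList _ _).mpr hg, hc⟩
  rw [hA]
  unfold pvHasRepeatedRun
  have hperm : (PySem.List.sorted G (fun x => x) false).Perm G := PySem.List.sorted_perm _ _ _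
  rw [pvRunScan_none t _ (by simpa using PySem.List.sorted_pairwise G (fun x => x))]
  simp only [decide_eq_decide]
  constructor
  · rintro ⟨g, hg, hc⟩
    exact ⟨g, hperm.mem_iff.mpr hg, by rw [hperm.count_eq]; exact hc⟩
  · rintro ⟨g, hg, hc⟩
    refine ⟨g, hperm.mem_iff.mp hg, ?_⟩
    rw [hperm.count_eq] at hc; exact hc

-- the two early-return chains agree once the per-list checks agree
lemma pvTopShape (c2 c3 : Prop) [Decidable c2] [Decidable c3] (b2 b3 : Bool) :
    (if (if c2 then b2 else false) then (true : Bool) else if c3 then b3 else false)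
      = (if decide c2 && b2 then true else if decide c3 && b3 then true else false) := by
  by_cases h2 : c2 <;> by_cases h3 : c3 <;> cases b2 <;> cases b3 <;> simp [h2, h3]

-- ===== VERDICT (by name: the statement is the Claim_ definition above) =====
theorem check_ngram_repetition_in_word_list_py_spec : Claim_equal_check_ngram_repetition_in_word_list_py := by
  intro words threshold _
  unfold Spec_check_ngram_repetition_in_word_list_py
  unfold check_ngram_repetition_in_word_list_py check_ngram_repetition_in_word_list_py_alt
  rw [← pvCounterHit_eq_scan, ← pvCounterHit_eq_scan]
  exact pvTopShape _ _ _ _
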